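-- pv_equiv track=rewrite | github.com/EyringMLClimateGroup/kuehbacher24ICMLA_PCMasking | test/utils/test_setup.py | _compare_spcam_var_lists
-- ===== SOURCE A (Python) =====
-- def _compare_spcam_var_lists(s, t):
--     t = list(t)  # make a mutable copy
--     try:
--         for elem in s:
--             t.remove(elem)
--     except ValueError:
--         return False
--     return not t
-- ===== SOURCE B (Python) =====
-- def _compare_spcam_var_lists(s, t):
--     s = list(s)
--     t = list(t)
--     if len(s) != len(t):
--         return False
--     seen = []
--     for elem in s:
--         if elem in seen:
--             continue
--         if s.count(elem) != t.count(elem):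
--             return False
--         seen.append(elem)
--     return True
-- ===== Notes on version B (the rewrite author's own statement) =====
-- stated objective: faster
-- what changed: Replaces A's destructive one-by-one removal from a mutable copy of t (with try/except ValueError) by a non-mutating length check plus a per-distinct-element multiplicity comparison with a 'seen' accumulator.
import Mathlib
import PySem

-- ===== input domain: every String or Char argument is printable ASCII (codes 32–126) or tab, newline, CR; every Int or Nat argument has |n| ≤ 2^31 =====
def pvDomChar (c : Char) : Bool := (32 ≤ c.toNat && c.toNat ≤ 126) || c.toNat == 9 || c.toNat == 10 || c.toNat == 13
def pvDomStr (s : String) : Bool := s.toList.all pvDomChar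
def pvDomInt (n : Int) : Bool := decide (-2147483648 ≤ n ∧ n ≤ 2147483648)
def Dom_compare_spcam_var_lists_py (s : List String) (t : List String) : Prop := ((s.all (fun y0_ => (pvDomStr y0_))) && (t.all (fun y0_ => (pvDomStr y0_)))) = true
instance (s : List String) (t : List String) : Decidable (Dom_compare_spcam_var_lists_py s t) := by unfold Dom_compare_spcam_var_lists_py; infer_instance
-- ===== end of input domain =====

-- B replaces A's destructive element-by-element removal by a length check plus a
-- per-distinct-element count comparison (faster when elements repeat: one count pass
-- per distinct element instead of one removal scan per occurrence).

-- ===== PORT A =====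
-- Port of A: remove each element of s from a copy of t; ValueError (remove? = none) → False; then 'not t'.
def pvRemoveAll (s : List String) (t : List String) : Option (List String) :=
  match s with
  | [] => some t
  | a :: rest =>
    match PySem.List.remove? t a with
    | none => none
    | some t' => pvRemoveAll rest t'

def compare_spcam_var_lists_py (s : List String) (t : List String) : Bool :=
  match pvRemoveAll s t with
  | none => false
  | some t' => t'.isEmpty

-- ===== PORT B =====
-- Port of B: length check, then compare per-element counts, skipping elements already seen.
def pvCountLoop (S T : List String) : List String → List String → Bool
  | [], _ => true
  | a :: rest, seen =>
    if seen.contains a then pvCountLoop S T rest seen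
    else if S.count a == T.count a then pvCountLoop S T rest (seen ++ [a])
    else false

def compare_spcam_var_lists_py_alt (s : List String) (t : List String) : Bool :=
  if s.length ≠ t.length then false
  else pvCountLoop s t s []

-- ===== PRECONDITION & SPEC =====
def Spec_compare_spcam_var_lists_py (s : List String) (t : List String) (out : Bool) : Prop := out = compare_spcam_var_lists_py_alt s t
instance (s : List String) (t : List String) (out : Bool) : Decidable (Spec_compare_spcam_var_lists_py s t out) := by unfold Spec_compare_spcam_var_lists_py; infer_instance

-- ===== CLAIM (what is proved, stated in full; the proofs are below) =====
def Claim_equal_compare_spcam_var_lists_py : Prop := ∀ (s : List String) (t : List String), Dom_compare_spcam_var_lists_py s t → Spec_compare_spcam_var_lists_py s t (compare_spcam_var_lists_py s t)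

-- ===== LEMMAS AND PROOFS =====

-- ===== VERDICT (by name: the statement is the Claim_ definition above) =====
-- A returns true iff s ~ t
theorem pvA_iff (s t : List String) : compare_spcam_var_lists_py s t = true ↔ s.Perm t := by
  induction s generalizing t with
  | nil =>
    simp only [compare_spcam_var_lists_py, pvRemoveAll, List.isEmpty_iff, List.nil_perm]
  | cons a rest ih =>
    by_cases h : a ∈ t
    · have hr := PySem.List.remove?_eq_some_erase t a h
      simp only [compare_spcam_var_lists_py, pvRemoveAll, hr]
      rw [show (match pvRemoveAll rest (t.erase a) with | none => false | some t' => t'.isEmpty) = compare_spcam_var_lists_py rest (t.erase a) from rfl,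
        ih, List.cons_perm_iff_perm_erase]
      exact ⟨fun hp => ⟨h, hp⟩, fun hp => hp.2⟩
    · have hr := (PySem.List.remove?_eq_none_iff t a).mpr h
      simp [compare_spcam_var_lists_py, pvRemoveAll, hr, List.cons_perm_iff_perm_erase, h]

theorem pvLoop_iff (S T : List String) (rest seen : List String) :
    pvCountLoop S T rest seen = true ↔ ∀ a ∈ rest, a ∉ seen → S.count a = T.count a := by
  induction rest generalizing seen with
  | nil => simp [pvCountLoop]
  | cons a rest ih =>
    by_cases hs : a ∈ seen
    · simp only [pvCountLoop, List.contains_eq_mem, hs, decide_true, if_true, ih, List.mem_cons]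
      constructor
      · intro h b hb hbn
        rcases hb with rfl | hb
        · exact absurd hs hbn
        · exact h b hb hbn
      · intro h b hb hbn; exact h b (Or.inr hb) hbn
    · by_cases hc : S.count a = T.count a
      · simp only [pvCountLoop, List.contains_eq_mem, hs, decide_false, Bool.false_eq_true,
          if_false, hc, beq_self_eq_true, if_true, ih, List.mem_cons, List.mem_append,
          not_or]
        constructor
        · intro h b hb hbn
          rcases hb with rfl | hb
          · exact hc
          · by_cases hba : b = a
            · exact hba ▸ hc
            · exact h b hb (by simp [hbn, hba])
        · intro h b hb hbn; exact h b (Or.inr hb) (by simp at hbn; tauto)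
      · have : (S.count a == T.count a) = false := by simpa using hc
        simp only [pvCountLoop, List.contains_eq_mem, hs, decide_false, Bool.false_eq_true,
          if_false, this, List.mem_cons]
        constructor
        · intro h; exact absurd h (by simp)
        · intro h; exact absurd (h a (Or.inl rfl) hs) hc

theorem pvB_iff (s t : List String) : compare_spcam_var_lists_py_alt s t = true ↔ s.Perm t := by
  rw [compare_spcam_var_lists_py_alt]
  by_cases hl : s.length = t.length
  · simp only [hl, ne_eq, not_true_eq_false, if_false, pvLoop_iff]
    constructor
    · intro h
      have hsub : s.Subperm t := List.subperm_ext_iff.mpr (fun a ha => le_of_eq (h a ha (by simp)))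
      exact hsub.perm_of_length_le (le_of_eq hl.symm)
    · intro hp a _ _; exact hp.count_eq a
  · simp only [ne_eq, hl, not_false_eq_true, if_true]
    exact ⟨fun h => absurd h (by simp), fun hp => absurd hp.length_eq hl⟩

theorem compare_spcam_var_lists_py_spec : Claim_equal_compare_spcam_var_lists_py := by
  intro s t _
  unfold Spec_compare_spcam_var_lists_py
  cases hb : compare_spcam_var_lists_py_alt s t
  · cases ha : compare_spcam_var_lists_py s t
    · rfl
    · exact absurd ((pvB_iff s t).mpr ((pvA_iff s t).mp ha)) (by simp [hb])
  · exact (pvA_iff s t).mpr ((pvB_iff s t).mp hb)
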